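-- pv_equiv track=rewrite | github.com/liuqj1/game-agent | agents.py | _bracket_balance
-- ===== SOURCE A (Python) =====
-- def _bracket_balance(js: str):
--     braces = brackets = parens = 0
--     in_str = None
--     esc = False
--
--     for ch in js:
--         if in_str is not None:
--             if esc:
--                 esc = False
--                 continue
--             if ch == "\\":
--                 esc = True
--                 continue
--             if ch == in_str:
--                 in_str = None
--             continue
--
--         if ch in ("'", '"', "`"):
--             in_str = ch
--             continue
--
--         if ch == "{":
--             braces += 1
--         elif ch == "}":
--             braces -= 1
--         elif ch == "[":
--             brackets += 1
--         elif ch == "]":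
--             brackets -= 1
--         elif ch == "(":
--             parens += 1
--         elif ch == ")":
--             parens -= 1
--
--     return braces, brackets, parens, in_str
-- ===== SOURCE B (Python) =====
-- # Nested-loop tokenizer over one shared iterator: the inner loop consumes a whole
-- # string literal (next() skips the escaped char), the outer loop adds deltas from a
-- # table; an unterminated literal returns early with its opening quote.
-- _DELTA = {"{": (1, 0, 0), "}": (-1, 0, 0),
--           "[": (0, 1, 0), "]": (0, -1, 0),
--           "(": (0, 0, 1), ")": (0, 0, -1)}
--
--
-- def _bracket_balance(js: str):
--     braces = brackets = parens = 0
--     it = iter(js)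
--     for ch in it:
--         if ch in "'\"`":
--             for c in it:
--                 if c == "\\":
--                     next(it, None)
--                 elif c == ch:
--                     break
--             else:
--                 return braces, brackets, parens, ch
--         else:
--             db, dk, dp = _DELTA.get(ch, (0, 0, 0))
--             braces += db
--             brackets += dk
--             parens += dp
--     return braces, brackets, parens, None
-- ===== Notes on version B (the rewrite author's own statement) =====
-- stated objective: alternative
-- what changed: A's single for-loop with in_str/esc flag state is replaced by a nested-loop tokenizer over one shared iterator: the inner loop consumes an entire string literal (skipping the escaped char with next()), the outer loop adds bracket deltas from a lookup table and returns early with the opening quote on an unterminated literal.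
import Mathlib
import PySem

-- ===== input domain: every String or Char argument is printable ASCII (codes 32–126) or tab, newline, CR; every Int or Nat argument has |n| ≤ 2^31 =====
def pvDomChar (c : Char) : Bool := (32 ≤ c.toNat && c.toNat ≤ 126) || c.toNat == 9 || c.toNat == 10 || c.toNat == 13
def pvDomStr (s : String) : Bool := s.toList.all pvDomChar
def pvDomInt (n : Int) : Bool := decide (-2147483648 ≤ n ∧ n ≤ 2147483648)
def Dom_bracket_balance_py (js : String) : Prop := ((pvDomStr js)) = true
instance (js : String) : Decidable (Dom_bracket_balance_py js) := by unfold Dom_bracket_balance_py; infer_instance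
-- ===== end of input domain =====

-- B replaces A's flag-based (in_str/esc) state machine by a nested-loop tokenizer with a
-- delta table; same cost, proved to return the same value on every input (objective: alternative).

-- ===== PORT A =====
-- state: (braces, brackets, parens, in_str, esc); one step of A's for-loop body
def stepA (s : Int × Int × Int × Option Char × Bool) (ch : Char) :
    Int × Int × Int × Option Char × Bool :=
  match s with
  | (b, k, p, some q, esc) =>
    if esc then (b, k, p, some q, false)
    else if ch = '\\' then (b, k, p, some q, true)
    else if ch = q then (b, k, p, none, false)
    else (b, k, p, some q, false)
  | (b, k, p, none, esc) =>
    if ch = '\'' ∨ ch = '"' ∨ ch = '`' then (b, k, p, some ch, esc)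
    else if ch = '{' then (b + 1, k, p, none, esc)
    else if ch = '}' then (b - 1, k, p, none, esc)
    else if ch = '[' then (b, k + 1, p, none, esc)
    else if ch = ']' then (b, k - 1, p, none, esc)
    else if ch = '(' then (b, k, p + 1, none, esc)
    else if ch = ')' then (b, k, p - 1, none, esc)
    else (b, k, p, none, esc)

def finishA (s : Int × Int × Int × Option Char × Bool) : Int × Int × Int × Option String :=
  (s.1, s.2.1, s.2.2.1, s.2.2.2.1.map (fun q => String.mk [q]))

def bracket_balance_py (js : String) : Int × Int × Int × Option String :=
  finishA (js.toList.foldl stepA (0, 0, 0, none, false))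

-- ===== PORT B =====
-- the _DELTA dict of Source B, ported as a total lookup with default (0,0,0)
def deltaB (ch : Char) : Int × Int × Int :=
  if ch = '{' then (1, 0, 0)
  else if ch = '}' then (-1, 0, 0)
  else if ch = '[' then (0, 1, 0)
  else if ch = ']' then (0, -1, 0)
  else if ch = '(' then (0, 0, 1)
  else if ch = ')' then (0, 0, -1)
  else (0, 0, 0)

-- Source B's inner for-loop: consume one string literal opened by q; `none` = iterator
-- exhausted (unterminated literal), `some rest` = what remains after the closing quote
def skipStr (q : Char) : List Char → Option (List Char)
  | [] => none
  | c :: rest =>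
    if c = '\\' then skipStr q rest.tail   -- next(it, None)
    else if c = q then some rest
    else skipStr q rest
termination_by l => l.length
decreasing_by all_goals (simp [List.length_tail]; try omega)

lemma skipStr_length (q : Char) : ∀ (l l' : List Char), skipStr q l = some l' →
    l'.length < l.length := by
  intro l
  induction l using skipStr.induct q with
  | case1 => intro l' h; simp [skipStr] at h
  | case2 rest ih =>
    intro l' h
    simp only [skipStr, if_pos rfl] at h
    have := ih l' h
    have h2 : rest.tail.length ≤ rest.length := by simp [List.length_tail]
    simp only [List.length_cons]; omega
  | case3 rest hq =>
    intro l' h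
    simp [skipStr, hq] at h
    subst h; simp
  | case4 c rest hc hq ih =>
    intro l' h
    simp [skipStr, hc, hq] at h
    have := ih l' h; simp only [List.length_cons]; omega

-- Source B's outer for-loop
def scanCode (l : List Char) (b k p : Int) : Int × Int × Int × Option String :=
  match h : l with
  | [] => (b, k, p, none)
  | ch :: rest =>
    if ch = '\'' ∨ ch = '"' ∨ ch = '`' then
      match hs : skipStr ch rest with
      | none => (b, k, p, some (String.mk [ch]))
      | some rest' => scanCode rest' b k p
    else
      match deltaB ch with
      | (db, dk, dp) => scanCode rest (b + db) (k + dk) (p + dp)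
termination_by l.length
decreasing_by
  · have := skipStr_length ch rest _ hs; simp; omega
  · simp

def bracket_balance_py_alt (js : String) : Int × Int × Int × Option String :=
  scanCode js.toList 0 0 0

-- ===== PRECONDITION & SPEC =====
def Spec_bracket_balance_py (js : String) (out : Int × Int × Int × Option String) : Prop := out = bracket_balance_py_alt js
instance (js : String) (out : Int × Int × Int × Option String) : Decidable (Spec_bracket_balance_py js out) := by unfold Spec_bracket_balance_py; infer_instance

-- ===== CLAIM (what is proved, stated in full; the proofs are below) =====
def Claim_equal_bracket_balance_py : Prop := ∀ (js : String), Dom_bracket_balance_py js → Spec_bracket_balance_py js (bracket_balance_py js)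

-- ===== LEMMAS AND PROOFS =====

-- inside a string literal, A's fold from state (…, some q, false) matches skipStr
lemma insideA (q : Char) : ∀ (l : List Char) (b k p : Int),
    finishA (l.foldl stepA (b, k, p, some q, false)) =
      (match skipStr q l with
       | none => (b, k, p, some (String.mk [q]))
       | some l' => finishA (l'.foldl stepA (b, k, p, none, false))) := by
  intro l
  induction l using skipStr.induct q with
  | case1 => intro b k p; simp [skipStr, finishA]
  | case2 rest ih =>
    intro b k p
    cases rest with
    | nil => simp [skipStr, stepA, finishA]
    | cons d rest2 =>
      simp only [List.foldl_cons, stepA, if_pos rfl, if_true, skipStr, List.tail_cons]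
      simpa using ih b k p
  | case3 rest hq =>
    intro b k p
    simp [skipStr, stepA, hq]
  | case4 c rest hc hq ih =>
    intro b k p
    simp only [List.foldl_cons, stepA, if_neg hc, if_neg hq, skipStr]
    simpa [hc, hq] using ih b k p

lemma outsideA : ∀ (l : List Char) (b k p : Int),
    finishA (l.foldl stepA (b, k, p, none, false)) = scanCode l b k p := by
  intro l
  induction hn : l.length using Nat.strong_induction_on generalizing l with
  | _ n ih =>
    cases l with
    | nil => intro b k p; simp [scanCode, finishA]
    | cons ch rest =>
      intro b k p
      by_cases hq : ch = '\'' ∨ ch = '"' ∨ ch = '`'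
      · simp only [List.foldl_cons, stepA, if_pos hq]
        rw [scanCode]
        simp only [if_pos hq]
        rw [insideA]
        cases hs : skipStr ch rest with
        | none => simp
        | some rest' =>
          simp only
          have hlt := skipStr_length ch rest rest' hs
          subst hn
          exact ih rest'.length (by simp; omega) rest' rfl b k p
      · simp only [List.foldl_cons, stepA, if_neg hq]
        rw [scanCode]
        simp only [if_neg hq]
        subst hn
        have IH := ih rest.length (by simp) rest rfl
        by_cases h1 : ch = '{'
        · simp [h1, deltaB, IH, sub_eq_add_neg]
        by_cases h2 : ch = '}'
        · simp [h1, h2, deltaB, IH, sub_eq_add_neg]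
        by_cases h3 : ch = '['
        · simp [h1, h2, h3, deltaB, IH, sub_eq_add_neg]
        by_cases h4 : ch = ']'
        · simp [h1, h2, h3, h4, deltaB, IH, sub_eq_add_neg]
        by_cases h5 : ch = '('
        · simp [h1, h2, h3, h4, h5, deltaB, IH, sub_eq_add_neg]
        by_cases h6 : ch = ')'
        · simp [h1, h2, h3, h4, h5, h6, deltaB, IH, sub_eq_add_neg]
        · simp [h1, h2, h3, h4, h5, h6, deltaB, IH, sub_eq_add_neg]

-- ===== VERDICT (by name: the statement is the Claim_ definition above) =====
theorem bracket_balance_py_spec : Claim_equal_bracket_balance_py := by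
  intro js _
  show _ = _
  unfold bracket_balance_py bracket_balance_py_alt
  exact outsideA js.toList 0 0 0
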